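-- pv_equiv track=rewrite | github.com/MengzeChen/FirstRepo | rad_script.py | find_motifs
-- ===== SOURCE A (Python) =====
-- def find_motifs(dna: str, motif: str) -> list[int]:
--     positions = []
--     start = 0
--     while True:
--         idx = dna.find(motif, start)
--         if idx == -1:
--             break
--         positions.append(idx)
--         start = idx + len(motif)
--     return positions
-- ===== SOURCE B (Python) =====
-- def find_motifs(dna: str, motif: str) -> list[int]:
--     m = len(motif)
--     # stage 1: every occurrence, overlapping ones included
--     all_pos = [i for i in range(len(dna) - m + 1) if dna.startswith(motif, i)]
--     # stage 2: greedy interval scheduling keeps the non-overlapping ones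
--     out = []
--     last_end = 0
--     for i in all_pos:
--         if i >= last_end:
--             out.append(i)
--             last_end = i + m
--     return out
-- ===== Notes on version B (the rewrite author's own statement) =====
-- stated objective: alternative
-- what changed: Replaces A's single find-and-jump loop with two staged passes: first enumerate ALL (overlapping) occurrence positions of the motif, then a greedy interval-scheduling filter selects the non-overlapping ones.
import Mathlib
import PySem

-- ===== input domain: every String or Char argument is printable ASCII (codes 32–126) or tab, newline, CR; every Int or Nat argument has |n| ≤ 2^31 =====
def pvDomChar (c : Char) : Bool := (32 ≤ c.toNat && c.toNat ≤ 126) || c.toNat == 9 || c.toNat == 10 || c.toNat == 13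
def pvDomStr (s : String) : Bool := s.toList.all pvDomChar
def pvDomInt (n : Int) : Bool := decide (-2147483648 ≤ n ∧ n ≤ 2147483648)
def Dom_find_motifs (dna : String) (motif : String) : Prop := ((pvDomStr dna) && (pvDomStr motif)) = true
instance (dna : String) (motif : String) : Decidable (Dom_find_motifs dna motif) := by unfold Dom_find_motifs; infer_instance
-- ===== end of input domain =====

-- B recomputes the result in two staged passes (all overlapping occurrences, then a greedy
-- non-overlap filter) instead of A's single find-and-jump loop (alternative algorithm, same cost).
-- Pre_ excludes the empty motif, on which Python A loops forever.


-- ===== PORT A =====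
-- A's while-True loop: repeatedly idx = dna.find(motif, start); the fuel (dna.length + 1)
-- only guards totality — with motif ≠ '' the loop runs at most dna.length + 1 iterations.
def findLoopA (dna motif : List Char) : Nat → Nat → List Int → List Int
  | 0, _, positions => positions
  | fuel + 1, start, positions =>
    if PySem.Chars.findFrom dna motif (start : Int) none = -1 then positions
    else findLoopA dna motif fuel
      ((PySem.Chars.findFrom dna motif (start : Int) none).toNat + motif.length)
      (positions ++ [PySem.Chars.findFrom dna motif (start : Int) none])

def find_motifs (dna : String) (motif : String) : List Int :=
  findLoopA dna.toList motif.toList (dna.toList.length + 1) 0 []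

-- ===== PORT B =====
-- Stage 1 of Source B: [i for i in range(len(dna)-m+1) if dna.startswith(motif, i)].
-- Python's range(len(dna)-m+1) clamps at 0 exactly like Nat subtraction dna.length + 1 - m;
-- dna.startswith(motif, i) for 0 ≤ i is exactly the slice comparison take/drop below.
def allOccurrences (dna motif : List Char) : List Nat :=
  (List.range (dna.length + 1 - motif.length)).filter
    (fun i => decide ((dna.drop i).take motif.length = motif))

-- Stage 2 of Source B: the greedy for-loop body over all_pos with state (out, last_end).
def greedyStep (m : Nat) (s : List Int × Nat) (i : Nat) : List Int × Nat :=
  if s.2 ≤ i then (s.1 ++ [(i : Int)], i + m) else s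

def find_motifs_alt (dna : String) (motif : String) : List Int :=
  ((allOccurrences dna.toList motif.toList).foldl
    (greedyStep motif.toList.length) (([] : List Int), 0)).1

-- ===== PRECONDITION & SPEC =====
-- Pre_ excludes motif = "", on which Python A loops forever (B returns every position there).
def Pre_find_motifs (dna : String) (motif : String) : Prop := motif ≠ ""
instance (dna : String) (motif : String) : Decidable (Pre_find_motifs dna motif) := by unfold Pre_find_motifs; infer_instance
def pvWitness_find_motifs : String × String := ("ACGTCGCG", "CG")

def Spec_find_motifs (dna : String) (motif : String) (out : List Int) : Prop := out = find_motifs_alt dna motif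
instance (dna : String) (motif : String) (out : List Int) : Decidable (Spec_find_motifs dna motif out) := by unfold Spec_find_motifs; infer_instance

-- ===== CLAIM (what is proved, stated in full; the proofs are below) =====
def Claim_equal_find_motifs : Prop := ∀ (dna : String) (motif : String), Dom_find_motifs dna motif → Pre_find_motifs dna motif → Spec_find_motifs dna motif (find_motifs dna motif)

-- ===== LEMMAS AND PROOFS =====

-- Proof-only bridge: a left-to-right non-overlapping scanner; both ports are shown equal to it.
def scanB (dna motif : List Char) (i : Nat) (positions : List Int) : List Int :=
  if h : i + motif.length ≤ dna.length ∧ motif ≠ [] then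
    if (dna.drop i).take motif.length = motif then
      scanB dna motif (i + motif.length) (positions ++ [(i : Int)])
    else
      scanB dna motif (i + 1) positions
  else positions
termination_by dna.length + 1 - i
decreasing_by
  · have : motif.length ≠ 0 := fun hz => h.2 (List.eq_nil_of_length_eq_zero hz)
    omega
  · omega

-- a match of motif at position i (i ≥ k) makes motif an infix of dna.drop k
lemma infix_of_match (dna motif : List Char) (k i : Nat) (hk : k ≤ i)
    (h : motif <+: dna.drop i) : motif <:+: dna.drop k := by
  have hdd : (dna.drop k).drop (i - k) = dna.drop i := by
    rw [List.drop_drop]; congr 1; omega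
  have hsuf : dna.drop i <:+ dna.drop k := hdd ▸ List.drop_suffix (i - k) (dna.drop k)
  exact h.isInfix.trans hsuf.isInfix

-- prefix test as slice comparison
lemma match_iff_take (dna motif : List Char) (i : Nat) :
    (dna.drop i).take motif.length = motif ↔ motif <+: dna.drop i := by
  constructor
  · intro h; exact h ▸ List.take_prefix _ _
  · intro h; exact (List.prefix_iff_eq_take.mp h).symm

-- a slice match means the motif fits: i + m ≤ n
lemma len_of_match (dna motif : List Char) (i : Nat) (hm : motif ≠ [])
    (h : (dna.drop i).take motif.length = motif) : i + motif.length ≤ dna.length := by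
  have hl := congrArg List.length h
  simp [List.length_take, List.length_drop] at hl
  have hpos : 0 < motif.length := List.length_pos_of_ne_nil hm
  omega

-- scanner skips positions with no match
lemma scanB_skip (dna motif : List Char) (j i : Nat) (acc : List Int)
    (hji : i ≤ j)
    (hno : ∀ p, i ≤ p → p < j → ¬ motif <+: dna.drop p) :
    scanB dna motif i acc = scanB dna motif j acc := by
  rcases Nat.lt_or_ge i j with hlt | hge
  · have hnom : ¬ (dna.drop i).take motif.length = motif := by
      rw [match_iff_take]; exact hno i le_rfl hlt
    by_cases hg : i + motif.length ≤ dna.length ∧ motif ≠ []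
    · rw [scanB, dif_pos hg, if_neg hnom]
      exact scanB_skip dna motif j (i + 1) acc (by omega) (fun p hp hpj => hno p (by omega) hpj)
    · rw [scanB, dif_neg hg]
      rw [scanB, dif_neg (fun h2 => hg ⟨by omega, h2.2⟩)]
  · have : i = j := by omega
    rw [this]
termination_by j - i

-- scanner finds no match at any position ⇒ returns the accumulator
lemma scanB_none (dna motif : List Char) (i : Nat) (acc : List Int)
    (hno : ∀ p, i ≤ p → ¬ motif <+: dna.drop p) :
    scanB dna motif i acc = acc := by
  rw [scanB]
  split
  · rw [if_neg (by rw [match_iff_take]; exact hno i le_rfl)]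
    exact scanB_none dna motif (i + 1) acc (fun p hp => hno p (by omega))
  · rfl
termination_by dna.length + 1 - i
decreasing_by
  rename_i h
  omega

-- A's find-driven loop equals the scanner from the same state
lemma loop_eq (dna motif : List Char) (hm : motif ≠ []) (fuel start : Nat) (acc : List Int)
    (hs : start ≤ dna.length) (hf : dna.length + 1 - start ≤ fuel) :
    findLoopA dna motif fuel start acc = scanB dna motif start acc := by
  match fuel with
  | 0 => omega
  | fuel + 1 =>
    rw [findLoopA]
    by_cases hidx : PySem.Chars.findFrom dna motif (start : Int) none = -1
    · rw [if_pos hidx]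
      have hninf : ¬ motif <:+: dna.drop start :=
        (PySem.Chars.findFrom_natCast_eq_neg_one_iff dna motif start hs).mp hidx
      exact (scanB_none dna motif start acc (fun p hp hpre =>
        hninf (infix_of_match dna motif start p hp hpre))).symm
    · rw [if_neg hidx]
      obtain ⟨hge, hpre, hfirst⟩ :=
        PySem.Chars.findFrom_natCast_spec dna motif start hs hidx
      generalize hgen : PySem.Chars.findFrom dna motif (start : Int) none = idx at hge hpre hfirst ⊢
      have hml : 0 < motif.length := List.length_pos_of_ne_nil hm
      have hidxcast : ((idx.toNat : Int)) = idx :=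
        Int.toNat_of_nonneg (le_trans (by exact_mod_cast Nat.zero_le start) hge)
      have hsi : start ≤ idx.toNat := by omega
      have hlend : motif.length ≤ dna.length - idx.toNat := by
        have h := hpre.length_le
        rwa [List.length_drop] at h
      have hlen : idx.toNat + motif.length ≤ dna.length := by omega
      have hstart1 : start + 1 ≤ idx.toNat + motif.length := by omega
      have hfb : dna.length + 1 - (idx.toNat + motif.length) ≤ fuel := by
        have e1 : dna.length + 1 - (idx.toNat + motif.length) ≤ dna.length + 1 - (start + 1) :=
          Nat.sub_le_sub_left hstart1 (dna.length + 1)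
        have e2 : dna.length + 1 - (start + 1) ≤ fuel := by omega
        exact le_trans e1 e2
      have hstep : scanB dna motif start acc
          = scanB dna motif (idx.toNat + motif.length) (acc ++ [idx]) := by
        rw [scanB_skip dna motif idx.toNat start acc hsi
            (fun p hp hpj => hfirst p (by exact_mod_cast hp) hpj)]
        rw [scanB, dif_pos ⟨hlen, hm⟩, if_pos ((match_iff_take dna motif idx.toNat).mpr hpre)]
        rw [hidxcast]
      rw [hstep]
      exact loop_eq dna motif hm fuel (idx.toNat + motif.length) (acc ++ [idx]) hlen hfb

-- B's greedy fold over any complete, sorted list of match positions equals the scanner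
lemma fold_eq_scan (dna motif : List Char) (hm : motif ≠ []) :
    ∀ (L : List Nat) (e : Nat) (acc : List Int),
      L.Pairwise (· < ·) →
      (∀ p ∈ L, (dna.drop p).take motif.length = motif) →
      (∀ p, e ≤ p → (dna.drop p).take motif.length = motif → p ∈ L) →
      (L.foldl (greedyStep motif.length) (acc, e)).1 = scanB dna motif e acc := by
  intro L
  induction L with
  | nil =>
    intro e acc _ _ hcomp
    refine (scanB_none dna motif e acc (fun p hp hpre => ?_)).symm
    exact absurd (hcomp p hp ((match_iff_take dna motif p).mpr hpre)) (List.not_mem_nil)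
  | cons p rest ih =>
    intro e acc hpw hall hcomp
    have hpwrest := hpw.of_cons
    have hlt : ∀ q ∈ rest, p < q := fun q hq => List.rel_of_pairwise_cons hpw hq
    have hmp : (dna.drop p).take motif.length = motif := hall p (List.mem_cons_self)
    have hpos : 0 < motif.length := List.length_pos_of_ne_nil hm
    by_cases he : e ≤ p
    · have hlen : p + motif.length ≤ dna.length := len_of_match dna motif p hm hmp
      have hskip : scanB dna motif e acc = scanB dna motif p acc := by
        refine scanB_skip dna motif p e acc he (fun q hq hqp hpre => ?_)
        have hq' := hcomp q hq ((match_iff_take dna motif q).mpr hpre)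
        rcases List.mem_cons.mp hq' with rfl | hqr
        · omega
        · exact absurd (hlt q hqr) (by omega)
      rw [hskip, scanB, dif_pos ⟨hlen, hm⟩, if_pos hmp]
      have hstep : greedyStep motif.length (acc, e) p = (acc ++ [(p : Int)], p + motif.length) := by
        simp [greedyStep, he]
      show (List.foldl (greedyStep motif.length) (greedyStep motif.length (acc, e) p) rest).1 = _
      rw [hstep]
      refine ih (p + motif.length) (acc ++ [(p : Int)]) hpwrest
        (fun q hq => hall q (List.mem_cons_of_mem _ hq)) (fun q hq hqm => ?_)
      have hq' := hcomp q (by omega) hqm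
      rcases List.mem_cons.mp hq' with rfl | hqr
      · omega
      · exact hqr
    · have hstep : greedyStep motif.length (acc, e) p = (acc, e) := by
        simp [greedyStep, he]
      show (List.foldl (greedyStep motif.length) (greedyStep motif.length (acc, e) p) rest).1 = _
      rw [hstep]
      refine ih e acc hpwrest (fun q hq => hall q (List.mem_cons_of_mem _ hq))
        (fun q hq hqm => ?_)
      have hq' := hcomp q hq hqm
      rcases List.mem_cons.mp hq' with rfl | hqr
      · omega
      · exact hqr

-- the occurrence list is sorted and complete
lemma allOcc_pairwise (dna motif : List Char) :
    (allOccurrences dna motif).Pairwise (· < ·) :=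
  List.Pairwise.sublist List.filter_sublist List.pairwise_lt_range

lemma allOcc_match (dna motif : List Char) (p : Nat) (hp : p ∈ allOccurrences dna motif) :
    (dna.drop p).take motif.length = motif := by
  have := (List.mem_filter.mp hp).2
  exact of_decide_eq_true this

lemma allOcc_complete (dna motif : List Char) (hm : motif ≠ []) (p : Nat)
    (hpm : (dna.drop p).take motif.length = motif) : p ∈ allOccurrences dna motif := by
  have hlen : p + motif.length ≤ dna.length := len_of_match dna motif p hm hpm
  have hpos : 0 < motif.length := List.length_pos_of_ne_nil hm
  exact List.mem_filter.mpr ⟨List.mem_range.mpr (by omega), decide_eq_true hpm⟩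

-- ===== VERDICT (by name: the statement is the Claim_ definition above) =====
theorem find_motifs_spec : Claim_equal_find_motifs := by
  intro dna motif _ hpre
  unfold Spec_find_motifs find_motifs find_motifs_alt
  have hm : motif.toList ≠ [] := by
    intro h
    exact hpre (by have := congrArg String.ofList h; simpa using this)
  rw [loop_eq dna.toList motif.toList hm (dna.toList.length + 1) 0 [] (Nat.zero_le _) (by omega)]
  exact (fold_eq_scan dna.toList motif.toList hm (allOccurrences dna.toList motif.toList) 0 []
    (allOcc_pairwise _ _) (allOcc_match _ _) (fun p _ => allOcc_complete _ _ hm p)).symm
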